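-- pv_equiv track=rewrite | github.com/Nekit678/PltLevel_Creator | Level_Map.py | tailing_coord
-- ===== SOURCE A (Python) =====
-- from typing import List, Literal, Tuple
--
-- def tailing_coord(pos: Tuple[int, int]) -> Tuple[int, int]:
--     x = pos[0]
--     y = pos[1]
--     while x % 32 != 0:
--         x -= 1
--     while y % 32 != 0:
--         y -= 1
--     return (x, y)
-- ===== SOURCE B (Python) =====
-- def tailing_coord(pos):
--     x = pos[0] - pos[0] % 32
--     y = pos[1] - pos[1] % 32
--     return (x, y)
-- ===== Notes on version B (the rewrite author's own statement) =====
-- stated objective: simpler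
-- what changed: Replaces the two decrement-until-multiple loops with the closed form x - x % 32 per coordinate (Python's floored mod makes this exact for negatives).
import Mathlib
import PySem

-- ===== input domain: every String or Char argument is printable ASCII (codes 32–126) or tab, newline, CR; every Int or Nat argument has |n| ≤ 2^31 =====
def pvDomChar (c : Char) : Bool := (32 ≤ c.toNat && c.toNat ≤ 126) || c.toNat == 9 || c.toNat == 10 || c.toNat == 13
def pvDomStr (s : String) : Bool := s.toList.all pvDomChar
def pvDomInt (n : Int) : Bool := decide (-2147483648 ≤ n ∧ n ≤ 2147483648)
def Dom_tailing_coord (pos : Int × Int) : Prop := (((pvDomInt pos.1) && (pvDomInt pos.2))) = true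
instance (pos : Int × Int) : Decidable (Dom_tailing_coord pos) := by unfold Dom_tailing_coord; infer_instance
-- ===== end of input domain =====

-- B replaces each decrement loop with the closed form x - x % 32 (simpler: one arithmetic step instead of a loop).

-- ===== PORT A =====
-- literal port of A's 'while x % 32 != 0: x -= 1' loop; terminates because the
-- Python mod (positive divisor) strictly decreases and is nonnegative
def tailingLoop (x : Int) : Int :=
  if PySem.Int.mod x 32 ≠ 0 then tailingLoop (x - 1) else x
termination_by (PySem.Int.mod x 32).toNat
decreasing_by
  have h32 : (0:Int) < 32 := by norm_num
  rw [PySem.Int.mod_eq_emod_of_pos h32, PySem.Int.mod_eq_emod_of_pos h32] at *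
  have h1 : 0 ≤ x % 32 := Int.emod_nonneg x (by norm_num)
  have h2 : x % 32 < 32 := Int.emod_lt_of_pos x (by norm_num)
  have hne : x % 32 ≠ 0 := by assumption
  have : (x - 1) % 32 = x % 32 - 1 := by omega
  omega

def tailing_coord (pos : Int × Int) : Int × Int :=
  let x := pos.1
  let y := pos.2
  (tailingLoop x, tailingLoop y)

-- ===== PORT B =====
def tailing_coord_alt (pos : Int × Int) : Int × Int :=
  let x := pos.1 - PySem.Int.mod pos.1 32
  let y := pos.2 - PySem.Int.mod pos.2 32
  (x, y)

-- ===== PRECONDITION & SPEC =====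
def Spec_tailing_coord (pos : Int × Int) (out : Int × Int) : Prop := out = tailing_coord_alt pos
instance (pos : Int × Int) (out : Int × Int) : Decidable (Spec_tailing_coord pos out) := by unfold Spec_tailing_coord; infer_instance

-- ===== CLAIM (what is proved, stated in full; the proofs are below) =====
def Claim_equal_tailing_coord : Prop := ∀ (pos : Int × Int), Dom_tailing_coord pos → Spec_tailing_coord pos (tailing_coord pos)

-- ===== LEMMAS AND PROOFS =====
theorem tailingLoop_eq (x : Int) : tailingLoop x = x - PySem.Int.mod x 32 := by
  rw [tailingLoop]
  split
  · rename_i h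
    have h32 : (0:Int) < 32 := by norm_num
    have ih := tailingLoop_eq (x - 1)
    rw [ih]
    rw [PySem.Int.mod_eq_emod_of_pos h32, PySem.Int.mod_eq_emod_of_pos h32] at *
    have h1 : 0 ≤ x % 32 := Int.emod_nonneg x (by norm_num)
    have h2 : x % 32 < 32 := Int.emod_lt_of_pos x (by norm_num)
    have : (x - 1) % 32 = x % 32 - 1 := by omega
    omega
  · rename_i h
    have : PySem.Int.mod x 32 = 0 := by by_contra hc; exact h hc
    omega
termination_by (PySem.Int.mod x 32).toNat
decreasing_by
  have h32 : (0:Int) < 32 := by norm_num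
  rw [PySem.Int.mod_eq_emod_of_pos h32, PySem.Int.mod_eq_emod_of_pos h32] at *
  have h1 : 0 ≤ x % 32 := Int.emod_nonneg x (by norm_num)
  have h2 : x % 32 < 32 := Int.emod_lt_of_pos x (by norm_num)
  have hne : x % 32 ≠ 0 := by assumption
  have : (x - 1) % 32 = x % 32 - 1 := by omega
  omega

-- ===== VERDICT =====
theorem tailing_coord_spec : Claim_equal_tailing_coord := by
  intro pos _
  unfold Spec_tailing_coord tailing_coord tailing_coord_alt
  simp [tailingLoop_eq]
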